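-- pv_equiv track=rewrite | github.com/kimzee23/ASA.py | function.py | alternate_merge
-- ===== SOURCE A (Python) =====
-- def alternate_merge(lst1, lst2):
--     result = []
--     length = min(len(lst1), len(lst2))
--     for i in range(length):
--         result.append(lst1[i])
--         result.append(lst2[i])
--     result.extend(lst1[length:] + lst2[length:])
--     return result
-- ===== SOURCE B (Python) =====
-- from itertools import chain, zip_longest
--
-- def alternate_merge(lst1, lst2):
--     fill = object()
--     return [x for x in chain.from_iterable(zip_longest(lst1, lst2, fillvalue=fill))
--             if x is not fill]
-- ===== Notes on version B (the rewrite author's own statement) =====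
-- stated objective: idiomatic
-- what changed: Replaces the index loop over range(min(len,len)) plus tail slicing/concatenation with a single itertools pass: zip_longest with a unique sentinel, flattened by chain.from_iterable, filtering the sentinel out.
import Mathlib
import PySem

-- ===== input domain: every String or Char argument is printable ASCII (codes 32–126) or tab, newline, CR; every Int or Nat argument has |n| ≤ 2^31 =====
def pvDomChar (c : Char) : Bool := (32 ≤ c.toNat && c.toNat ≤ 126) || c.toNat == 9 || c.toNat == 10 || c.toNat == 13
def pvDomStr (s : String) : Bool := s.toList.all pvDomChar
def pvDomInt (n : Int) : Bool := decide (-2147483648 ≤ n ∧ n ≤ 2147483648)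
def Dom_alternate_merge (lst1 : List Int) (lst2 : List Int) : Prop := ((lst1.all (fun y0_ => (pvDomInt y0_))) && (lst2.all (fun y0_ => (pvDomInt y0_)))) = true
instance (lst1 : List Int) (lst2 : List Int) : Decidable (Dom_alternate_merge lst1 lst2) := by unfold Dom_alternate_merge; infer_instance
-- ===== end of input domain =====

-- B replaces A's index loop + tail slicing with a pad-with-sentinel interleave (zip_longest)
-- and a filter; same behaviour, more idiomatic.

-- ===== PORT A =====
-- literal port of A: index loop over range(min(len,len)) appending lst1[i], lst2[i],
-- then extend with lst1[length:] + lst2[length:].  The indices are always in range,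
-- so pyGetD with default 0 is exact here.
def alternate_merge (lst1 : List Int) (lst2 : List Int) : List Int :=
  let length : Int := min (PySem.List.len lst1) (PySem.List.len lst2)
  let result : List Int :=
    (PySem.List.pyRange 0 length 1).foldl
      (fun r i => (r ++ [PySem.List.pyGetD lst1 i 0]) ++ [PySem.List.pyGetD lst2 i 0]) []
  result ++ (PySem.List.slice lst1 (some length) none ++ PySem.List.slice lst2 (some length) none)

-- ===== PORT B =====
-- zip_longest with a sentinel: 'none' plays the role of the fresh fill object
-- (identity-filtered out afterwards), exact because the fill can never be a list element.
def zipLongestFill : List Int → List Int → List (Option Int × Option Int)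
  | [], [] => []
  | x :: xs, [] => (some x, none) :: zipLongestFill xs []
  | [], y :: ys => (none, some y) :: zipLongestFill [] ys
  | x :: xs, y :: ys => (some x, some y) :: zipLongestFill xs ys

def alternate_merge_alt (lst1 : List Int) (lst2 : List Int) : List Int :=
  ((zipLongestFill lst1 lst2).flatMap (fun p => [p.1, p.2])).filterMap id

-- ===== PRECONDITION & SPEC =====
def Spec_alternate_merge (lst1 : List Int) (lst2 : List Int) (out : List Int) : Prop := out = alternate_merge_alt lst1 lst2
instance (lst1 : List Int) (lst2 : List Int) (out : List Int) : Decidable (Spec_alternate_merge lst1 lst2 out) := by unfold Spec_alternate_merge; infer_instance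

-- ===== CLAIM (what is proved, stated in full; the proofs are below) =====
def Claim_equal_alternate_merge : Prop := ∀ (lst1 : List Int) (lst2 : List Int), Dom_alternate_merge lst1 lst2 → Spec_alternate_merge lst1 lst2 (alternate_merge lst1 lst2)

-- ===== LEMMAS AND PROOFS =====

-- a foldl that only ever appends produces init ++ flatMap
theorem foldl_append_blocks (h : Int → List Int) :
    ∀ (xs : List Int) (init : List Int),
      xs.foldl (fun r i => r ++ h i) init = init ++ xs.flatMap h := by
  intro xs
  induction xs with
  | nil => simp
  | cons x xs ih => intro init; simp [List.foldl_cons, ih, List.append_assoc]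

theorem alt_nil_left : ∀ l2 : List Int, alternate_merge_alt [] l2 = l2 := by
  intro l2
  induction l2 with
  | nil => simp [alternate_merge_alt, zipLongestFill]
  | cons y ys ih =>
    simpa [alternate_merge_alt, zipLongestFill] using ih

theorem alt_nil_right : ∀ l1 : List Int, alternate_merge_alt l1 [] = l1 := by
  intro l1
  induction l1 with
  | nil => simp [alternate_merge_alt, zipLongestFill]
  | cons x xs ih =>
    simpa [alternate_merge_alt, zipLongestFill] using ih

theorem alt_cons_cons (x y : Int) (xs ys : List Int) :
    alternate_merge_alt (x :: xs) (y :: ys) = x :: y :: alternate_merge_alt xs ys := by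
  simp [alternate_merge_alt, zipLongestFill]

theorem interleave_eq : ∀ (l1 l2 : List Int),
    (List.range (min l1.length l2.length)).flatMap (fun k => [l1.getD k 0, l2.getD k 0])
      ++ (l1.drop (min l1.length l2.length) ++ l2.drop (min l1.length l2.length))
    = alternate_merge_alt l1 l2 := by
  intro l1
  induction l1 with
  | nil => intro l2; simp [alt_nil_left]
  | cons x xs ih =>
    intro l2
    cases l2 with
    | nil => simp [alt_nil_right]
    | cons y ys =>
      have hmin : min (x :: xs).length (y :: ys).length = min xs.length ys.length + 1 := by
        simp [Nat.succ_min_succ]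
      rw [hmin, alt_cons_cons, List.range_succ_eq_map, ← ih ys]
      simp [List.flatMap_map]

theorem alternate_merge_eq_alt (l1 l2 : List Int) :
    alternate_merge l1 l2 = alternate_merge_alt l1 l2 := by
  unfold alternate_merge
  dsimp only
  have hlen : min (PySem.List.len l1) (PySem.List.len l2)
      = ((min l1.length l2.length : Nat) : Int) := by
    simp [PySem.List.len_eq, Nat.cast_min]
  rw [hlen]
  rw [show (fun (r : List Int) (i : Int) =>
        (r ++ [PySem.List.pyGetD l1 i 0]) ++ [PySem.List.pyGetD l2 i 0])
      = (fun (r : List Int) (i : Int) =>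
        r ++ ([PySem.List.pyGetD l1 i 0] ++ [PySem.List.pyGetD l2 i 0])) from by
    funext r i; simp]
  rw [foldl_append_blocks]
  rw [PySem.List.slice_from_natCast, PySem.List.slice_from_natCast]
  rw [PySem.List.pyRange_zero_natCast]
  rw [← interleave_eq l1 l2]
  simp [List.flatMap_map]

-- ===== VERDICT (by name: the statement is the Claim_ definition above) =====
theorem alternate_merge_spec : Claim_equal_alternate_merge := by
  intro l1 l2 _
  unfold Spec_alternate_merge
  exact alternate_merge_eq_alt l1 l2
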